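-- pv_equiv track=rewrite | github.com/lamltdao/leetcode | 2655-find-maximal-uncovered-ranges/2655-find-maximal-uncovered-ranges.py | findMaximalUncoveredRanges
-- ===== SOURCE A (Python) =====
-- from typing import List
--
-- def findMaximalUncoveredRanges(n: int, ranges: List[List[int]]) -> List[List[int]]:
--     """
--     cover 0 -> n-1
--     sort ranges ascendingly O(nlogn)
--     merge ranges if overlap O(n)
--     difference of ranges to get uncovered ranges
--     """
--
--     # requires: r1 < r2 (range comparison)
--     def overlap(r1, r2):
--         return r1[1] >= r2[0]
--     def merge(r1, r2):
--         return [min(r1[0], r2[0]), max(r1[1], r2[1])]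
--     r = [[-1,-1]]
--     r.extend(ranges)
--     r.append([n,n])
--     r.sort()
--     merged_r = []
--     i = 0
--     """
--     [-1,-1], [0,2], [3,3]
--     """
--     while i < len(r):
--         j = i
--         tmp_r = r[i]
--         while j+1 < len(r) and overlap(tmp_r,r[j+1]):
--             tmp_r = merge(tmp_r, r[j+1])
--             j+=1
--         merged_r.append(tmp_r[::])
--         i = j+1
--     ans = []
--     for i in range(len(merged_r)-1):
--         start_uncovered_r = merged_r[i][1]+1
--         end_uncovered_r = merged_r[i+1][0]-1
--         if start_uncovered_r <= end_uncovered_r: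
--             ans.append([start_uncovered_r, end_uncovered_r])
--     return ans
-- ===== SOURCE B (Python) =====
-- def findMaximalUncoveredRanges(n, ranges):
--     # One forward sweep over the sorted intervals (sentinels included):
--     # emit each gap as soon as the running coverage end 'cur' is passed.
--     ans = []
--     cur = None
--     for r in sorted([[-1, -1]] + ranges + [[n, n]]):
--         s, e = r[0], r[1]
--         if cur is None:
--             cur = e
--         elif s > cur:
--             if cur + 1 <= s - 1:
--                 ans.append([cur + 1, s - 1])
--             cur = e
--         else:
--             cur = max(cur, e)
--     return ans
-- ===== Notes on version B (the rewrite author's own statement) =====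
-- stated objective: simpler
-- what changed: Replaces A's two-phase merge-then-difference (build an explicit merged interval list with nested while loops, then a second pass over consecutive pairs) by a single forward sweep over the sorted intervals that keeps only the running coverage end and emits each gap directly.
-- outside the precondition, e.g. on findMaximalUncoveredRanges(0, [[5]]): A returns [[1, 4]], B raises IndexError
import Mathlib
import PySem

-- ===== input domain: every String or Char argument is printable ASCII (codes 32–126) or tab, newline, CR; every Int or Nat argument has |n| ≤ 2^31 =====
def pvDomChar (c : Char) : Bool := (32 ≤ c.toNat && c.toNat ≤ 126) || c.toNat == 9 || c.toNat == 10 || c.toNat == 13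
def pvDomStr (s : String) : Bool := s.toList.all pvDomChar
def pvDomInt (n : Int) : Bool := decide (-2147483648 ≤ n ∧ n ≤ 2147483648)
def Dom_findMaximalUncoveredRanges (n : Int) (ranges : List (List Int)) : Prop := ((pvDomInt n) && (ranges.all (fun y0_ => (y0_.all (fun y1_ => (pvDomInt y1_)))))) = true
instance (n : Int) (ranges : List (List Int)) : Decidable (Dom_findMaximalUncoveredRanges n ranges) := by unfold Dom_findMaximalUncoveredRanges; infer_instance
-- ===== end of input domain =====

-- B replaces A's merge-then-difference (build a merged interval list, then a second pass
-- over consecutive pairs) by a single forward sweep that emits each gap directly.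
-- A sorts a local copy, so neither implementation mutates the caller's list.

-- ===== PORT A =====
-- Indexing r[i] for i = 0, 1: on every admitted input (Pre_ gives length ≥ 2, and the
-- sentinels / merged pairs have length 2) the index is in range, so pyGet? is `some`
-- and the `.getD 0` default is never used (Python raises IndexError outside Pre_).
def pvAt (r : List Int) (i : Int) : Int := (PySem.List.pyGet? r i).getD 0

-- def overlap(r1, r2): return r1[1] >= r2[0]
def pvOverlap (r1 r2 : List Int) : Bool := pvAt r1 1 ≥ pvAt r2 0

-- def merge(r1, r2): return [min(r1[0], r2[0]), max(r1[1], r2[1])]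
def pvMerge (r1 r2 : List Int) : List Int :=
  [min (pvAt r1 0) (pvAt r2 0), max (pvAt r1 1) (pvAt r2 1)]

-- inner `while j+1 < len(r) and overlap(tmp_r, r[j+1])`: walk the suffix after position i,
-- absorbing overlapping intervals into tmp_r; returns (final tmp_r, suffix from j+1)
def pvAbsorb (tmp : List Int) (rest : List (List Int)) : List Int × List (List Int) :=
  match rest with
  | [] => (tmp, [])
  | y :: ys => if pvOverlap tmp y then pvAbsorb (pvMerge tmp y) ys else (tmp, y :: ys)

theorem pvAbsorb_snd_len (tmp : List Int) (rest : List (List Int)) :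
    (pvAbsorb tmp rest).2.length ≤ rest.length := by
  induction rest generalizing tmp with
  | nil => simp [pvAbsorb]
  | cons y ys ih =>
      simp only [pvAbsorb]
      split
      · exact le_trans (ih _) (by simp)
      · simp

-- outer `while i < len(r)` building merged_r (tmp_r[::] appends the same list value)
def pvMergeLoop (r : List (List Int)) : List (List Int)  :=
  match r with
  | [] => []
  | x :: rest =>
      (pvAbsorb x rest).1 :: pvMergeLoop (pvAbsorb x rest).2
termination_by r.length
decreasing_by
  have := pvAbsorb_snd_len x rest
  simp
  omega

-- `for i in range(len(merged_r)-1)`: each step reads merged_r[i], merged_r[i+1] —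
-- the obvious structural recursion over consecutive pairs
def pvGaps (m : List (List Int)) : List (List Int) :=
  match m with
  | a :: b :: rest =>
      (if pvAt a 1 + 1 ≤ pvAt b 0 - 1 then [[pvAt a 1 + 1, pvAt b 0 - 1]] else [])
        ++ pvGaps (b :: rest)
  | _ => []

def findMaximalUncoveredRanges (n : Int) (ranges : List (List Int)) : List (List Int) :=
  -- r = [[-1,-1]]; r.extend(ranges); r.append([n,n]); r.sort()
  let r := PySem.List.sorted ([-1, -1] :: (ranges ++ [[n, n]])) (fun x => x) false
  pvGaps (pvMergeLoop r)

-- ===== PORT B =====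
-- one fold over the sorted intervals; state = (cur : Option Int, ans so far)
def pvStep (st : Option Int × List (List Int)) (r : List Int) : Option Int × List (List Int) :=
  let s := pvAt r 0
  let e := pvAt r 1
  match st.1 with
  | none => (some e, st.2)
  | some c =>
      if s > c then
        (some e, st.2 ++ (if c + 1 ≤ s - 1 then [[c + 1, s - 1]] else []))
      else (some (max c e), st.2)

def findMaximalUncoveredRanges_alt (n : Int) (ranges : List (List Int)) : List (List Int) :=
  let items := PySem.List.sorted ([-1, -1] :: (ranges ++ [[n, n]])) (fun x => x) false
  (items.foldl pvStep ((none : Option Int), ([] : List (List Int)))).2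

-- ===== PRECONDITION & SPEC =====
-- Pre_ excludes ranges containing a list with fewer than two elements: Python A raises
-- IndexError on essentially all of them, returning only by accident when such a short
-- list happens to sort last, and B raises IndexError there.
def Pre_findMaximalUncoveredRanges (n : Int) (ranges : List (List Int)) : Prop :=
  ∀ r ∈ ranges, 2 ≤ r.length
instance (n : Int) (ranges : List (List Int)) : Decidable (Pre_findMaximalUncoveredRanges n ranges) := by
  unfold Pre_findMaximalUncoveredRanges; infer_instance

def pvWitness_findMaximalUncoveredRanges : Int × List (List Int) := (10, [[2, 5], [7, 8]])

def Spec_findMaximalUncoveredRanges (n : Int) (ranges : List (List Int)) (out : List (List Int)) : Prop := out = findMaximalUncoveredRanges_alt n ranges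
instance (n : Int) (ranges : List (List Int)) (out : List (List Int)) : Decidable (Spec_findMaximalUncoveredRanges n ranges out) := by unfold Spec_findMaximalUncoveredRanges; infer_instance

-- ===== CLAIM (what is proved, stated in full; the proofs are below) =====
def Claim_equal_findMaximalUncoveredRanges : Prop := ∀ (n : Int) (ranges : List (List Int)), Dom_findMaximalUncoveredRanges n ranges → Pre_findMaximalUncoveredRanges n ranges → Spec_findMaximalUncoveredRanges n ranges (findMaximalUncoveredRanges n ranges)

-- ===== LEMMAS AND PROOFS =====

-- the value of B's sweep from a running coverage end c (B's loop after `cur` is set)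
def pvSweep (c : Int) (l : List (List Int)) : List (List Int) :=
  match l with
  | [] => []
  | y :: ys =>
      if pvAt y 0 > c then
        (if c + 1 ≤ pvAt y 0 - 1 then [[c + 1, pvAt y 0 - 1]] else []) ++ pvSweep (pvAt y 1) ys
      else pvSweep (max c (pvAt y 1)) ys

theorem pvAt_pair0 (a b : Int) : pvAt [a, b] 0 = a := rfl
theorem pvAt_pair1 (a b : Int) : pvAt [a, b] 1 = b := rfl

-- head component of the absorbed block is the first interval's start when all later starts dominate
theorem pvAbsorb_fst_head (rest : List (List Int)) (tmp : List Int)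
    (h : ∀ z ∈ rest, pvAt tmp 0 ≤ pvAt z 0) :
    pvAt (pvAbsorb tmp rest).1 0 = pvAt tmp 0 := by
  induction rest generalizing tmp with
  | nil => simp [pvAbsorb]
  | cons y ys ih =>
      simp only [pvAbsorb]
      split
      · have hy := h y (by simp)
        have := ih (pvMerge tmp y) (by
          intro z hz
          have := h z (by simp [hz])
          simp [pvMerge, pvAt_pair0]
          omega)
        simp [pvMerge, pvAt_pair0] at this ⊢
        omega
      · rfl

-- A's merge-then-gaps equals B's sweep, given sorted starts
theorem pvMerge_eq_sweep (rest : List (List Int)) (tmp : List Int)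
    (hpw : rest.Pairwise (fun a b => pvAt a 0 ≤ pvAt b 0)) :
    pvGaps (pvMergeLoop (tmp :: rest)) = pvSweep (pvAt tmp 1) rest := by
  induction rest generalizing tmp with
  | nil => simp [pvMergeLoop, pvAbsorb, pvGaps, pvSweep]
  | cons y ys ih =>
      rw [List.pairwise_cons] at hpw
      by_cases h : pvOverlap tmp y
      · have hrw : pvMergeLoop (tmp :: y :: ys) = pvMergeLoop (pvMerge tmp y :: ys) := by
          rw [pvMergeLoop, pvMergeLoop]
          simp [pvAbsorb, h]
        rw [hrw, ih _ hpw.2]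
        have h' : ¬ (pvAt y 0 > pvAt tmp 1) := by
          simp [pvOverlap] at h; omega
        simp [pvSweep, h', pvMerge, pvAt_pair1]
      · have hrw : pvMergeLoop (tmp :: y :: ys) = tmp :: pvMergeLoop (y :: ys) := by
          rw [pvMergeLoop]
          simp [pvAbsorb, h]
        have hrw2 : pvMergeLoop (y :: ys) = (pvAbsorb y ys).1 :: pvMergeLoop (pvAbsorb y ys).2 := by
          rw [pvMergeLoop]
        have hhead : pvAt (pvAbsorb y ys).1 0 = pvAt y 0 :=
          pvAbsorb_fst_head ys y hpw.1
        have h' : pvAt y 0 > pvAt tmp 1 := by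
          simp [pvOverlap] at h; omega
        rw [hrw, hrw2, pvGaps, ← hrw2, ih _ hpw.2]
        simp [pvSweep, h', hhead]

-- B's fold with `cur` set equals the sweep, with the accumulator out front
theorem pvFold_eq_sweep (l : List (List Int)) (c : Int) (acc : List (List Int)) :
    (l.foldl pvStep ((some c : Option Int), acc)).2 = acc ++ pvSweep c l := by
  induction l generalizing c acc with
  | nil => simp [pvSweep]
  | cons y ys ih =>
      rw [List.foldl_cons, pvSweep]
      by_cases h : pvAt y 0 > c
      · have hs : pvStep (some c, acc) y
            = (some (pvAt y 1), acc ++ (if c + 1 ≤ pvAt y 0 - 1 then [[c + 1, pvAt y 0 - 1]] else [])) := by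
          simp [pvStep, h]
        rw [hs, ih, List.append_assoc, if_pos h]
      · have hs : pvStep (some c, acc) y = (some (max c (pvAt y 1)), acc) := by
          simp [pvStep, h]
        rw [hs, ih, if_neg h]

theorem pairwise_head_le (L : List (List Int))
    (hpw : L.Pairwise (· ≤ ·)) (hlen : ∀ r ∈ L, 2 ≤ r.length) :
    L.Pairwise (fun a b => pvAt a 0 ≤ pvAt b 0) := by
  refine List.Pairwise.imp_of_mem ?_ hpw
  intro a b ha hb hab
  have h2a := hlen a ha
  have h2b := hlen b hb
  match a, b with
  | x :: as, y :: bs =>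
      show pvAt (x :: as) 0 ≤ pvAt (y :: bs) 0
      have hxy : x ≤ y := by
        rcases lt_or_eq_of_le hab with hlt | heq
        · have h2 : List.Lex (· < ·) (x :: as) (y :: bs) := hlt
          cases h2 with
          | rel h => exact le_of_lt h
          | cons h => exact le_refl _
        · cases heq; exact le_refl _
      simpa [pvAt, PySem.List.pyGet?, PySem.List.pyIdx?] using hxy
  | [], _ => simp at h2a
  | _ :: _, [] => simp at h2b

theorem my_sorted_pairwise (xs : List (List Int)) :
    (PySem.List.sorted xs (fun x => x) false).Pairwise (· ≤ ·) := by
  have h := PySem.List.sorted_pairwise (xs := xs) (key := fun x : List Int => x)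
  convert h using 2

-- ===== VERDICT (by name: the statement is the Claim_ definition above) =====
theorem findMaximalUncoveredRanges_spec : Claim_equal_findMaximalUncoveredRanges := by
  intro n ranges _ hpre
  unfold Spec_findMaximalUncoveredRanges findMaximalUncoveredRanges findMaximalUncoveredRanges_alt
  set L := PySem.List.sorted ([-1, -1] :: (ranges ++ [[n, n]])) (fun x => x) false with hL
  have hlen : ∀ r ∈ L, 2 ≤ r.length := by
    intro r hr
    have : r ∈ ([-1, -1] :: (ranges ++ [[n, n]])) := by
      rw [hL] at hr
      exact (PySem.List.mem_sorted _ _ _ _).mp hr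
    simp at this
    rcases this with h | h | h
    · simp [h]
    · exact hpre r h
    · simp [h]
  have hpw : L.Pairwise (fun a b => pvAt a 0 ≤ pvAt b 0) :=
    pairwise_head_le L (my_sorted_pairwise _) hlen
  cases hM : L with
  | nil =>
      exfalso
      have := (PySem.List.sorted_eq_nil_iff ([-1, -1] :: (ranges ++ [[n, n]]))
        (fun x : List Int => x) false).mp (hL ▸ hM)
      simp at this
  | cons x rest =>
      rw [hM] at hpw
      rw [List.pairwise_cons] at hpw
      rw [pvMerge_eq_sweep rest x hpw.2]
      show pvSweep (pvAt x 1) rest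
        = (List.foldl pvStep ((none : Option Int), ([] : List (List Int))) (x :: rest)).2
      rw [List.foldl_cons]
      have hs : pvStep ((none : Option Int), ([] : List (List Int))) x = (some (pvAt x 1), []) := by
        simp [pvStep]
      rw [hs, pvFold_eq_sweep]
      simp
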